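-- pv_equiv track=rewrite | github.com/UVA-DSA/EgoEMS | Benchmarks/ActionRecognition/Audio/keystep_segmentation.py | has_punctuation_in_keystep
-- ===== SOURCE A (Python) =====
-- import string
-- import string
--
-- def has_punctuation_in_keystep(data):
--     keystep = data['Keystep']
--
--     # Function to check if a list has punctuation
--     def has_punctuation(lst):
--         for item in lst:
--             if any(char in string.punctuation for char in item):
--                 return True
--         return False
--
--     # Go through each keystep and check for punctuation
--     for sequence in keystep.values():
--         if has_punctuation(sequence):
--             return True  # Return True if any list contains punctuation
--
--     return False  # Return False if no punctuation is found
-- ===== SOURCE B (Python) =====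
-- import string
--
-- def has_punctuation_in_keystep(data):
--     charset = set()
--     for sequence in data['Keystep'].values():
--         for s in sequence:
--             charset |= set(s)
--     return bool(charset & set(string.punctuation))
-- ===== Notes on version B (the rewrite author's own statement) =====
-- stated objective: idiomatic
-- what changed: B replaces the three nested short-circuiting character scans with a build-then-intersect set computation: it accumulates one set of all characters occurring in the keystep strings and returns whether it intersects the punctuation set.
-- outside the precondition, e.g. on has_punctuation_in_keystep({}): A raises KeyError, B raises KeyError
import Mathlib
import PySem

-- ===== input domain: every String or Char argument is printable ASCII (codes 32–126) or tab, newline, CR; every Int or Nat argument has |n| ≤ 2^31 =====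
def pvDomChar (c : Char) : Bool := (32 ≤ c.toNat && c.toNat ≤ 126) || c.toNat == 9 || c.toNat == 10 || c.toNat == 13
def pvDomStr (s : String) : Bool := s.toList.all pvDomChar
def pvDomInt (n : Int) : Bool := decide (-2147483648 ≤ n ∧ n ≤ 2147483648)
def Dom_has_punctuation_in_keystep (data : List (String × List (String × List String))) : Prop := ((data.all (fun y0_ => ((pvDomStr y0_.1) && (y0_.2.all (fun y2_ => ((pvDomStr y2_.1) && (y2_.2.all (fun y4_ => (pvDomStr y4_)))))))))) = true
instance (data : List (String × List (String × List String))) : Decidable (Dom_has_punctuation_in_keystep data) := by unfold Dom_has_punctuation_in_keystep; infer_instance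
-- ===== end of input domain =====

-- B builds one set of all characters in the keystep strings and intersects it with the punctuation set, instead of A's nested short-circuiting scans (idiomatic; return value only).
-- ===== PORT A =====
-- string.punctuation, as a list of characters
def pvPunct : List Char := "!\"#$%&'()*+,-./:;<=>?@[\\]^_`{|}~".toList

-- inner helper has_punctuation(lst): loop with early return = List.any
def pvHasPunctList (lst : List String) : Bool :=
  lst.any (fun item => item.toList.any (fun c => pvPunct.contains c))

def has_punctuation_in_keystep (data : List (String × List (String × List String))) : Bool :=
  match (PySem.Dict.mk data).get? "Keystep" with
  | none => false  -- KeyError in Python; excluded by Pre_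
  | some keystep =>
      ((PySem.Dict.mk keystep).values).any pvHasPunctList

-- ===== PORT B =====
def has_punctuation_in_keystep_alt (data : List (String × List (String × List String))) : Bool :=
  match (PySem.Dict.mk data).get? "Keystep" with
  | none => false  -- KeyError in Python; excluded by Pre_
  | some keystep =>
      let charset : PySem.Set Char :=
        ((PySem.Dict.mk keystep).values).foldl
          (fun acc sequence =>
            sequence.foldl (fun acc s => PySem.Set.union acc s.toList) acc)
          PySem.Set.empty
      !(PySem.Set.inter charset (PySem.Set.ofList pvPunct)).isEmpty

-- ===== PRECONDITION & SPEC =====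
-- Pre_ excludes exactly the inputs without a "Keystep" key, on which data['Keystep'] raises KeyError in A (and in B).
def Pre_has_punctuation_in_keystep (data : List (String × List (String × List String))) : Prop :=
  data.any (fun kv => kv.1 == "Keystep") = true
instance (data : List (String × List (String × List String))) : Decidable (Pre_has_punctuation_in_keystep data) := by unfold Pre_has_punctuation_in_keystep; infer_instance

def pvWitness_has_punctuation_in_keystep : (List (String × List (String × List String))) :=
  [("Keystep", [("s1", ["open bag", "cut!"])])]

def Spec_has_punctuation_in_keystep (data : List (String × List (String × List String))) (out : Bool) : Prop := out = has_punctuation_in_keystep_alt data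
instance (data : List (String × List (String × List String))) (out : Bool) : Decidable (Spec_has_punctuation_in_keystep data out) := by unfold Spec_has_punctuation_in_keystep; infer_instance

-- ===== CLAIM (what is proved, stated in full; the proofs are below) =====
def Claim_equal_has_punctuation_in_keystep : Prop := ∀ (data : List (String × List (String × List String))), Dom_has_punctuation_in_keystep data → Pre_has_punctuation_in_keystep data → Spec_has_punctuation_in_keystep data (has_punctuation_in_keystep data)

-- ===== LEMMAS AND PROOFS =====
-- membership in B's accumulated character set
lemma mem_charFold (seqs : List (List String)) (acc : PySem.Set Char) (x : Char) :
    (x ∈ seqs.foldl (fun a sequence => sequence.foldl (fun a s => PySem.Set.union a s.toList) a) acc)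
      ↔ x ∈ acc ∨ ∃ sq ∈ seqs, ∃ s ∈ sq, x ∈ s.toList := by
  induction seqs generalizing acc with
  | nil => simp
  | cons sq rest ih =>
    have inner : ∀ (strs : List String) (a : PySem.Set Char),
        (x ∈ strs.foldl (fun a s => PySem.Set.union a s.toList) a) ↔ x ∈ a ∨ ∃ s ∈ strs, x ∈ s.toList := by
      intro strs
      induction strs with
      | nil => simp
      | cons s rest2 ih2 =>
        intro a
        simp [ih2, PySem.Set.mem_union]
        tauto
    simp only [List.foldl_cons, ih, inner, List.mem_cons]
    constructor
    · rintro ((h | ⟨s, hs, hx⟩) | ⟨q, hq, s, hs, hx⟩)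
      · exact Or.inl h
      · exact Or.inr ⟨sq, Or.inl rfl, s, hs, hx⟩
      · exact Or.inr ⟨q, Or.inr hq, s, hs, hx⟩
    · rintro (h | ⟨q, (rfl | hq), s, hs, hx⟩)
      · exact Or.inl (Or.inl h)
      · exact Or.inl (Or.inr ⟨s, hs, hx⟩)
      · exact Or.inr ⟨q, hq, s, hs, hx⟩

lemma isEmpty_false_iff (l : List Char) : l.isEmpty = false ↔ ∃ x, x ∈ l := by
  cases l <;> simp

-- ===== VERDICT (by name: the statement is the Claim_ definition above) =====
theorem has_punctuation_in_keystep_spec : Claim_equal_has_punctuation_in_keystep := by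
  intro data _ _
  unfold Spec_has_punctuation_in_keystep has_punctuation_in_keystep has_punctuation_in_keystep_alt
  cases (PySem.Dict.mk data).get? "Keystep" with
  | none => rfl
  | some keystep =>
    simp only
    rw [Bool.eq_iff_iff]
    rw [Bool.not_eq_eq_eq_not, Bool.not_true, isEmpty_false_iff]
    constructor
    · intro h
      obtain ⟨sq, hsq, hs⟩ := List.any_eq_true.mp h
      obtain ⟨s, hsmem, hc⟩ := List.any_eq_true.mp hs
      obtain ⟨c, hcmem, hp⟩ := List.any_eq_true.mp hc
      refine ⟨c, ?_⟩
      rw [PySem.Set.mem_inter]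
      exact ⟨(mem_charFold _ _ _).mpr (Or.inr ⟨sq, hsq, s, hsmem, hcmem⟩),
             (PySem.Set.mem_ofList _ _).mpr (by simpa using hp)⟩
    · rintro ⟨c, hc⟩
      rw [PySem.Set.mem_inter] at hc
      obtain ⟨hmem, hpunct⟩ := hc
      rcases (mem_charFold _ _ _).mp hmem with h | ⟨sq, hsq, s, hsmem, hcmem⟩
      · simp [PySem.Set.empty] at h
      · refine List.any_eq_true.mpr ⟨sq, hsq, ?_⟩
        refine List.any_eq_true.mpr ⟨s, hsmem, ?_⟩
        refine List.any_eq_true.mpr ⟨c, hcmem, ?_⟩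
        simpa using (PySem.Set.mem_ofList _ _).mp hpunct
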